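-- pv_equiv track=rewrite | github.com/daijunhaoMinecraft/Minecraft_Bedrock_Edition_Json_generator | main.py | simplify_string
-- ===== SOURCE A (Python) =====
-- def simplify_string(input_string):
--     output_string = ""
--     count = 0
--     for char in input_string:
--         if char == '%':
--             count += 1
--         else:
--             if count % 2 == 0:
--                 output_string += '%' * (count // 2)
--             else:
--                 output_string += '%' * ((count - 1) // 2) + char
--             count = 0
--
--     # 处理最后一组连续的百分号
--     if count % 2 == 0:
--         output_string += '%' * (count // 2)
--     else:
--         output_string += '%' * ((count - 1) // 2)
--
--     return output_string
-- ===== SOURCE B (Python) =====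
-- def simplify_string(input_string):
--     out = []
--     i = 0
--     n = len(input_string)
--     while i < n:
--         if input_string[i] == '%':
--             j = i
--             while j < n and input_string[j] == '%':
--                 j += 1
--             run = j - i
--             out.append('%' * (run // 2))
--             if run % 2 == 1 and j < n:
--                 out.append(input_string[j])
--                 j += 1
--             i = j
--         else:
--             i += 1
--     return ''.join(out)
-- ===== Notes on version B (the rewrite author's own statement) =====
-- stated objective: alternative
-- what changed: Replaces the per-character counter loop with string concatenation by an index scan over maximal percent-sign runs that emits half the run plus the single follower character for odd runs, collecting pieces in a list joined once.
import Mathlib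
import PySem

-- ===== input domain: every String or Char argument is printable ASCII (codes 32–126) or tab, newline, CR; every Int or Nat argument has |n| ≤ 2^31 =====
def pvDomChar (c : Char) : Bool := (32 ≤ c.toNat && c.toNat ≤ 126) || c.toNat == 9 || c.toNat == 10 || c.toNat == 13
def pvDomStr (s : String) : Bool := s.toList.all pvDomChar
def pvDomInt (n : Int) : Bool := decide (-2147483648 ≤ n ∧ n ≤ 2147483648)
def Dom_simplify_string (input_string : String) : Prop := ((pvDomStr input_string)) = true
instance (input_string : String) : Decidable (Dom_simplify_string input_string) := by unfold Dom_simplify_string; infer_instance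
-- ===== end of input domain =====

-- B rewrites A's per-character counter loop as a scan over maximal '%' runs (alternative decomposition, same cost).

-- ===== PORT A =====
-- state: (output_string as List Char, count); literal transliteration of A's loop + epilogue
def pvStepA (st : List Char × Nat) (char : Char) : List Char × Nat :=
  if char = '%' then (st.1, st.2 + 1)
  else if st.2 % 2 = 0 then (st.1 ++ List.replicate (st.2 / 2) '%', 0)
  else (st.1 ++ (List.replicate ((st.2 - 1) / 2) '%' ++ [char]), 0)

def simplify_string (input_string : String) : String :=
  let st := input_string.toList.foldl pvStepA ([], 0)
  if st.2 % 2 = 0 then String.mk (st.1 ++ List.replicate (st.2 / 2) '%')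
  else String.mk (st.1 ++ List.replicate ((st.2 - 1) / 2) '%')

-- ===== PORT B =====
-- Source B's inner while: strip the leading run of '%', returning its length and the rest
def pvTakeRun : List Char → Nat × List Char
  | [] => (0, [])
  | c :: rest =>
    if c = '%' then
      let p := pvTakeRun rest
      (p.1 + 1, p.2)
    else (0, c :: rest)

theorem pvTakeRun_len : ∀ l : List Char, (pvTakeRun l).2.length ≤ l.length := by
  intro l
  induction l with
  | nil => simp [pvTakeRun]
  | cons c rest ih =>
    simp only [pvTakeRun]
    split
    · simpa using Nat.le_succ_of_le ih
    · simp

-- Source B's outer while loop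
def pvAltGo : List Char → List Char
  | [] => []
  | c :: rest =>
    if c = '%' then
      let p := pvTakeRun rest
      let run := p.1 + 1
      let out := List.replicate (run / 2) '%'
      if run % 2 = 1 then
        match h : p.2 with
        | [] => out
        | d :: r2 => out ++ d :: pvAltGo r2
      else out ++ pvAltGo p.2
    else pvAltGo rest
termination_by l => l.length
decreasing_by
  · have := pvTakeRun_len rest
    rw [h] at this
    simp at this ⊢
    omega
  · have := pvTakeRun_len rest
    simp
    omega
  · simp

def simplify_string_alt (input_string : String) : String :=
  String.mk (pvAltGo input_string.toList)

-- ===== PRECONDITION & SPEC =====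
def Spec_simplify_string (input_string : String) (out : String) : Prop := out = simplify_string_alt input_string
instance (input_string : String) (out : String) : Decidable (Spec_simplify_string input_string out) := by unfold Spec_simplify_string; infer_instance

-- ===== CLAIM (what is proved, stated in full; the proofs are below) =====
def Claim_equal_simplify_string : Prop := ∀ (input_string : String), Dom_simplify_string input_string → Spec_simplify_string input_string (simplify_string input_string)

-- ===== LEMMAS AND PROOFS =====

-- A's remaining output given the pending '%'-count c and remaining input l (loop body + epilogue)
def pvF : List Char → Nat → List Char
  | [], c => List.replicate (c / 2) '%'
  | ch :: t, c =>
    if ch = '%' then pvF t (c + 1)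
    else (if c % 2 = 0 then List.replicate (c / 2) '%'
          else List.replicate ((c - 1) / 2) '%' ++ [ch]) ++ pvF t 0

theorem pvFoldA (l : List Char) : ∀ (acc : List Char) (c : Nat),
    (let st := l.foldl pvStepA (acc, c);
     if st.2 % 2 = 0 then st.1 ++ List.replicate (st.2 / 2) '%'
     else st.1 ++ List.replicate ((st.2 - 1) / 2) '%') = acc ++ pvF l c := by
  induction l with
  | nil =>
    intro acc c
    simp only [List.foldl, pvF]
    split
    · rfl
    · have hc : (c - 1) / 2 = c / 2 := by omega
      rw [hc]
  | cons ch t ih =>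
    intro acc c
    simp only [List.foldl, pvF, pvStepA]
    by_cases h : ch = '%'
    · simp [h, ih]
    · simp only [h, if_false]
      by_cases hp : c % 2 = 0
      · simp [hp, ih, List.append_assoc]
      · simp [hp, ih, List.append_assoc]

-- what B returns on a run-fronted tail: the RHS of pvFspec at c = 0
theorem pvAltGo_eq (l : List Char) :
    pvAltGo l = List.replicate ((pvTakeRun l).1 / 2) '%' ++
      (if (pvTakeRun l).1 % 2 = 1 then
         match (pvTakeRun l).2 with
         | [] => []
         | d :: r2 => d :: pvAltGo r2
       else pvAltGo (pvTakeRun l).2) := by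
  cases l with
  | nil => simp [pvAltGo, pvTakeRun]
  | cons c rest =>
    by_cases h : c = '%'
    · simp only [pvAltGo, pvTakeRun, h, if_true]
      split
      · split
        · simp_all
        · simp_all
      · rfl
    · simp only [pvAltGo, pvTakeRun, h, if_false]
      simp

theorem pvFspec (l : List Char) : ∀ (c : Nat),
    pvF l c = List.replicate ((c + (pvTakeRun l).1) / 2) '%' ++
      (if (c + (pvTakeRun l).1) % 2 = 1 then
         match (pvTakeRun l).2 with
         | [] => []
         | d :: r2 => d :: pvAltGo r2
       else pvAltGo (pvTakeRun l).2) := by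
  induction l with
  | nil =>
    intro c
    simp only [pvF, pvTakeRun, Nat.add_zero]
    split
    · simp
    · simp [pvAltGo]
  | cons ch t ih =>
    intro c
    by_cases h : ch = '%'
    · simp only [pvF, pvTakeRun, h, if_true]
      rw [ih (c + 1)]
      have : c + 1 + (pvTakeRun t).1 = c + ((pvTakeRun t).1 + 1) := by omega
      rw [this]
    · simp only [pvF, pvTakeRun, h, if_false]
      have ht : pvF t 0 = pvAltGo t := by
        rw [ih 0, pvAltGo_eq t]
        simp
      rw [ht]
      simp only [Nat.add_zero]
      by_cases hp : c % 2 = 0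
      · have h1 : ¬ c % 2 = 1 := by omega
        simp only [hp, if_true]
        simp [pvAltGo, h]
      · have h1 : c % 2 = 1 := by omega
        have hd : (c - 1) / 2 = c / 2 := by omega
        simp [h1, hd]

theorem pvAB (l : List Char) : pvF l 0 = pvAltGo l := by
  rw [pvFspec l 0, pvAltGo_eq l]
  simp

-- ===== VERDICT (by name: the statement is the Claim_ definition above) =====
theorem simplify_string_spec : Claim_equal_simplify_string := by
  intro s _
  show _ = _
  unfold simplify_string simplify_string_alt
  rw [← pvAB]
  have := pvFoldA s.toList [] 0
  simp only [List.nil_append] at this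
  simp only []
  split <;> simp_all
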